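-- pv_equiv track=rewrite | github.com/rapidsai/cuvs | fern/scripts/generate_api_reference.py | numpy_type_needs_continuation
-- ===== SOURCE A (Python) =====
-- def numpy_type_needs_continuation(value: str) -> bool:
--     value = value.strip()
--     if value.endswith(","):
--         return True
--     depth = {"(": 0, "[": 0, "{": 0, "<": 0}
--     for char in value:
--         update_depth(depth, char)
--     return any(depth.values())
--
-- def update_depth(depth: dict[str, int], char: str) -> None:
--     if char in "([{<":
--         depth[char] += 1
--     elif char == ")":
--         depth["("] = max(depth["("] - 1, 0)
--     elif char == "]":
--         depth["["] = max(depth["["] - 1, 0)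
--     elif char == "}":
--         depth["{"] = max(depth["{"] - 1, 0)
--     elif char == ">":
--         depth["<"] = max(depth["<"] - 1, 0)
-- ===== SOURCE B (Python) =====
-- def numpy_type_needs_continuation(value: str) -> bool:
--     value = value.strip()
--     if value.endswith(","):
--         return True
--     return any(_unclosed(value, o, c)
--                for o, c in [("(", ")"), ("[", "]"), ("{", "}"), ("<", ">")])
--
-- def _unclosed(s: str, o: str, c: str) -> bool:
--     depth = 0
--     for ch in s:
--         if ch == o:
--             depth += 1
--         elif ch == c:
--             depth = max(depth - 1, 0)
--     return depth > 0
-- ===== Notes on version B (the rewrite author's own statement) =====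
-- stated objective: alternative
-- what changed: Replaces the single pass maintaining a 4-key depth dict with four independent single-counter scans (one per bracket pair) combined with any(), keeping the strip and trailing-comma short-circuit.
import Mathlib
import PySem

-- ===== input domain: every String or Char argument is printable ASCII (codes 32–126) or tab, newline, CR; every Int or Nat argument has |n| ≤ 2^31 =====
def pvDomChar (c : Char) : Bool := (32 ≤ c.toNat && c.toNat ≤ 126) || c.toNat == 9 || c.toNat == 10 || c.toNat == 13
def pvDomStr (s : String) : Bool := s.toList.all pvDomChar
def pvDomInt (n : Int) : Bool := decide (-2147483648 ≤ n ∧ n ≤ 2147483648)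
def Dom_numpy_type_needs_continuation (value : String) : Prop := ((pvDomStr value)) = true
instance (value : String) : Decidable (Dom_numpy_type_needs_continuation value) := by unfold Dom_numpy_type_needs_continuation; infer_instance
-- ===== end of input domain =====

-- B replaces A's single pass over a 4-key depth dict by four independent single-counter
-- scans (one per bracket pair) combined with any(); alternative decomposition, same cost class.

-- ===== PORT A =====
-- update_depth(depth, char): mutating helper, ported as Dict -> Dict.
-- 'char in "([{<"' ported as membership of the char in the literal's char list (exact for 1-char needles).
def update_depth (depth : PySem.Dict Char Int) (char : Char) : PySem.Dict Char Int :=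
  if ("([{<".toList.contains char) then
    depth.modify char 0 (· + 1)
  else if char = ')' then
    depth.insert '(' (max (depth.getD '(' 0 - 1) 0)
  else if char = ']' then
    depth.insert '[' (max (depth.getD '[' 0 - 1) 0)
  else if char = '}' then
    depth.insert '{' (max (depth.getD '{' 0 - 1) 0)
  else if char = '>' then
    depth.insert '<' (max (depth.getD '<' 0 - 1) 0)
  else depth

def numpy_type_needs_continuation (value : String) : Bool :=
  let value := PySem.Str.strip value
  if PySem.Str.endswith value "," then true
  else
    let depth : PySem.Dict Char Int := PySem.Dict.ofList [('(', 0), ('[', 0), ('{', 0), ('<', 0)]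
    let depth := value.toList.foldl update_depth depth
    -- any(depth.values()): an int is truthy iff nonzero
    depth.values.any (fun v => v != 0)

-- ===== PORT B =====
def pvStep (o c : Char) (d : Int) (ch : Char) : Int :=
  if ch = o then d + 1 else if ch = c then max (d - 1) 0 else d

def pvUnclosed (s : List Char) (o c : Char) : Bool :=
  decide (s.foldl (pvStep o c) 0 > 0)

def numpy_type_needs_continuation_alt (value : String) : Bool :=
  let value := PySem.Str.strip value
  if PySem.Str.endswith value "," then true
  else
    [('(', ')'), ('[', ']'), ('{', '}'), ('<', '>')].any
      (fun p => pvUnclosed value.toList p.1 p.2)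

-- ===== PRECONDITION & SPEC =====
def Spec_numpy_type_needs_continuation (value : String) (out : Bool) : Prop := out = numpy_type_needs_continuation_alt value
instance (value : String) (out : Bool) : Decidable (Spec_numpy_type_needs_continuation value out) := by unfold Spec_numpy_type_needs_continuation; infer_instance

-- ===== CLAIM (what is proved, stated in full; the proofs are below) =====
def Claim_equal_numpy_type_needs_continuation : Prop := ∀ (value : String), Dom_numpy_type_needs_continuation value → Spec_numpy_type_needs_continuation value (numpy_type_needs_continuation value)

-- ===== LEMMAS AND PROOFS =====

-- The dict-fold of A decomposes into four independent counters, one per bracket pair.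
theorem foldl_update_depth (xs : List Char) (a b c d : Int) :
    xs.foldl update_depth
      (PySem.Dict.mk [('(', a), ('[', b), ('{', c), ('<', d)]) =
    PySem.Dict.mk [('(', xs.foldl (pvStep '(' ')') a), ('[', xs.foldl (pvStep '[' ']') b),
                   ('{', xs.foldl (pvStep '{' '}') c), ('<', xs.foldl (pvStep '<' '>') d)] := by
  induction xs generalizing a b c d with
  | nil => rfl
  | cons ch rest ih =>
    simp only [List.foldl_cons]
    have hstep : update_depth (PySem.Dict.mk [('(', a), ('[', b), ('{', c), ('<', d)]) ch =
        PySem.Dict.mk [('(', pvStep '(' ')' a ch), ('[', pvStep '[' ']' b ch),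
                       ('{', pvStep '{' '}' c ch), ('<', pvStep '<' '>' d ch)] := by
      by_cases h1 : ch = '('
      · subst h1; rfl
      by_cases h2 : ch = '['
      · subst h2; rfl
      by_cases h3 : ch = '{'
      · subst h3; rfl
      by_cases h4 : ch = '<'
      · subst h4; rfl
      by_cases h5 : ch = ')'
      · subst h5; rfl
      by_cases h6 : ch = ']'
      · subst h6; rfl
      by_cases h7 : ch = '}'
      · subst h7; rfl
      by_cases h8 : ch = '>'
      · subst h8; rfl
      simp [update_depth, pvStep, h1, h2, h3, h4, h5, h6, h7, h8]
    rw [hstep, ih]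

theorem foldl_pvStep_nonneg (o c : Char) (xs : List Char) (d : Int) (hd : 0 ≤ d) :
    0 ≤ xs.foldl (pvStep o c) d := by
  induction xs generalizing d with
  | nil => exact hd
  | cons ch rest ih =>
    simp only [List.foldl_cons]
    apply ih
    unfold pvStep
    split_ifs <;> omega

theorem bne_zero_eq_decide (a : Int) (h : 0 ≤ a) : (a != 0) = decide (0 < a) := by
  rw [Bool.eq_iff_iff]; simp; omega

theorem main_eq (xs : List Char) :
    ((xs.foldl update_depth
        (PySem.Dict.ofList [('(', 0), ('[', 0), ('{', 0), ('<', 0)])).values.any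
      (fun v => v != 0)) =
    [('(', ')'), ('[', ']'), ('{', '}'), ('<', '>')].any (fun p => pvUnclosed xs p.1 p.2) := by
  have hd : PySem.Dict.ofList [('(', (0:Int)), ('[', 0), ('{', 0), ('<', 0)] =
      PySem.Dict.mk [('(', 0), ('[', 0), ('{', 0), ('<', 0)] := rfl
  rw [hd, foldl_update_depth]
  have n1 := foldl_pvStep_nonneg '(' ')' xs 0 le_rfl
  have n2 := foldl_pvStep_nonneg '[' ']' xs 0 le_rfl
  have n3 := foldl_pvStep_nonneg '{' '}' xs 0 le_rfl
  have n4 := foldl_pvStep_nonneg '<' '>' xs 0 le_rfl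
  simp only [PySem.Dict.values, List.map, List.any_cons, List.any_nil,
    pvUnclosed, gt_iff_lt, bne_zero_eq_decide _ n1, bne_zero_eq_decide _ n2,
    bne_zero_eq_decide _ n3, bne_zero_eq_decide _ n4]

-- ===== VERDICT (by name: the statement is the Claim_ definition above) =====
theorem numpy_type_needs_continuation_spec : Claim_equal_numpy_type_needs_continuation := by
  intro value _
  unfold Spec_numpy_type_needs_continuation numpy_type_needs_continuation numpy_type_needs_continuation_alt
  simp [main_eq]
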